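-- pv_equiv track=rewrite | github.com/JohannesWaltmann/advent_of_code_2021 | day_02/day02.py | calc_position_aimed
-- ===== SOURCE A (Python) =====
-- def calc_position_aimed(input_data):
--     """
--     Computes the horizontal and depth position based on a set of different input commands.
--     Uses the aim to compute the depth position instead of using 'up' and 'down' commands directly.
--
--     :param input_data: String array of different movement commands
--     :return: The position based on the multiplication of the horizontal and vertical position
--     """
--     _aim, _depth, _horizontal = 0, 0, 0
--
--     for elem in input_data:
--         if elem[:-2] == 'forward':
--             _horizontal += int(elem[-1])
--             _depth += (_aim * int(elem[-1]))
--         elif elem[:-2] == 'up':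
--             _aim -= int(elem[-1])
--         elif elem[:-2] == 'down':
--             _aim += int(elem[-1])
--
--     return _horizontal * _depth
-- ===== SOURCE B (Python) =====
-- def _parse(elem):
--     """Parse one command into (aim_delta, forward_magnitude); None if unrecognised."""
--     head = elem[:-2]
--     if head == 'forward':
--         return (0, int(elem[-1]))
--     if head == 'up':
--         return (-int(elem[-1]), 0)
--     if head == 'down':
--         return (int(elem[-1]), 0)
--     return None
--
--
-- def calc_position_aimed(input_data):
--     cmds = [c for c in map(_parse, input_data) if c is not None]
--     # prefix sums of aim deltas: aims[i] is the aim in force for cmds[i]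
--     aims = [0]
--     for d, _ in cmds:
--         aims.append(aims[-1] + d)
--     horizontal = sum(m for _, m in cmds)
--     depth = sum(a * m for (_, m), a in zip(cmds, aims))
--     return horizontal * depth
-- ===== Notes on version B (the rewrite author's own statement) =====
-- stated objective: alternative
-- what changed: Replaces A's single stateful loop carrying (aim, depth, horizontal) with a parse pass into (aim_delta, forward_magnitude) pairs, an explicit prefix-sum table of aims, and two independent sums (horizontal and aim-weighted depth) that are multiplied.
import Mathlib
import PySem

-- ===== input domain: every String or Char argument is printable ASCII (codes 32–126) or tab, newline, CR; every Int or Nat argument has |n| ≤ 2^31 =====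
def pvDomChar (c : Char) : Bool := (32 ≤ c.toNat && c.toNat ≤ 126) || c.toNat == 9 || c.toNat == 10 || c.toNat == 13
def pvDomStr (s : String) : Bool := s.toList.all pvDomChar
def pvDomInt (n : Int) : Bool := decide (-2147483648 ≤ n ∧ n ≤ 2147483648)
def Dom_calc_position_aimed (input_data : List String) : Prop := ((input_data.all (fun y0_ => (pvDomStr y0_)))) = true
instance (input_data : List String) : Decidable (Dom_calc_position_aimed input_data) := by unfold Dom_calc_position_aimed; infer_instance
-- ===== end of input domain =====

-- B re-decomposes A's single stateful loop into parse + prefix-sum aim table + two sums; equal value, same O(n) cost (objective: alternative).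

-- int(elem[-1]) as an Option: none exactly where Python raises (IndexError/ValueError); Pre_ excludes those inputs.
def pvLastInt? (elem : String) : Option Int :=
  (PySem.List.pyGet? elem.toList (-1)).bind (fun c => PySem.Int.ofChars? [c])

-- elem[:-2]
def pvHead (elem : String) : List Char :=
  PySem.List.slice elem.toList none (some (-2))

-- ===== PORT A =====
-- literal port of A's loop; state is (_aim, _depth, _horizontal); .getD 0 is only reached
-- outside Pre_ (where the Python raises)
def calc_position_aimed (input_data : List String) : Int :=
  let st := input_data.foldl (fun (s : Int × Int × Int) elem =>
    let a := s.1; let d := s.2.1; let h := s.2.2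
    if pvHead elem = "forward".toList then
      (a, d + a * (pvLastInt? elem).getD 0, h + (pvLastInt? elem).getD 0)
    else if pvHead elem = "up".toList then
      (a - (pvLastInt? elem).getD 0, d, h)
    else if pvHead elem = "down".toList then
      (a + (pvLastInt? elem).getD 0, d, h)
    else (a, d, h)) (0, 0, 0)
  st.2.2 * st.2.1

-- ===== PORT B =====
-- _parse: (aim_delta, forward_magnitude), none for unrecognised commands
def pvParse (elem : String) : Option (Int × Int) :=
  if pvHead elem = "forward".toList then some (0, (pvLastInt? elem).getD 0)
  else if pvHead elem = "up".toList then some (-(pvLastInt? elem).getD 0, 0)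
  else if pvHead elem = "down".toList then some ((pvLastInt? elem).getD 0, 0)
  else none

-- the 'aims' prefix-sum loop of Source B (aims[-1] via pyGet? (-1), as in Python)
def pvAimsLoop (cmds : List (Int × Int)) (aims : List Int) : List Int :=
  match cmds with
  | [] => aims
  | (d, _) :: t => pvAimsLoop t (aims ++ [(PySem.List.pyGet? aims (-1)).getD 0 + d])

def calc_position_aimed_alt (input_data : List String) : Int :=
  let cmds := (input_data.map pvParse).filterMap id
  let aims := pvAimsLoop cmds [0]
  let horizontal := cmds.foldl (fun acc p => acc + p.2) 0
  let depth := (cmds.zip aims).foldl (fun acc p => acc + p.2 * p.1.2) 0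
  horizontal * depth

-- ===== PRECONDITION & SPEC =====
-- Pre_ excludes exactly the inputs on which Python A raises: an element whose elem[:-2] is one
-- of the three command words but whose last character is not parseable by int() (ValueError).
def Pre_calc_position_aimed (input_data : List String) : Prop :=
  ∀ elem ∈ input_data,
    (pvHead elem = "forward".toList ∨ pvHead elem = "up".toList ∨ pvHead elem = "down".toList) →
    (pvLastInt? elem).isSome = true
instance (input_data : List String) : Decidable (Pre_calc_position_aimed input_data) := by unfold Pre_calc_position_aimed; infer_instance

def pvWitness_calc_position_aimed : List String := ["forward 5", "down 3", "up 1", "forward 2", "noop"]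

def Spec_calc_position_aimed (input_data : List String) (out : Int) : Prop := out = calc_position_aimed_alt input_data
instance (input_data : List String) (out : Int) : Decidable (Spec_calc_position_aimed input_data out) := by unfold Spec_calc_position_aimed; infer_instance

-- ===== CLAIM (what is proved, stated in full; the proofs are below) =====
def Claim_equal_calc_position_aimed : Prop := ∀ (input_data : List String), Dom_calc_position_aimed input_data → Pre_calc_position_aimed input_data → Spec_calc_position_aimed input_data (calc_position_aimed input_data)

-- ===== LEMMAS AND PROOFS =====

-- specification-side helpers (proof only)
def pvSumD (cmds : List (Int × Int)) : Int := (cmds.map Prod.fst).sum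
def pvSumM (cmds : List (Int × Int)) : Int := (cmds.map Prod.snd).sum
def pvDepthFrom (a : Int) : List (Int × Int) → Int
  | [] => 0
  | (d, m) :: t => a * m + pvDepthFrom (a + d) t

theorem pvAfold_eq (l : List String) :
    ∀ (a d h : Int),
      l.foldl (fun (s : Int × Int × Int) elem =>
        let a := s.1; let d := s.2.1; let h := s.2.2
        if pvHead elem = "forward".toList then
          (a, d + a * (pvLastInt? elem).getD 0, h + (pvLastInt? elem).getD 0)
        else if pvHead elem = "up".toList then
          (a - (pvLastInt? elem).getD 0, d, h)
        else if pvHead elem = "down".toList then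
          (a + (pvLastInt? elem).getD 0, d, h)
        else (a, d, h)) (a, d, h)
      = (a + pvSumD ((l.map pvParse).filterMap id),
         d + pvDepthFrom a ((l.map pvParse).filterMap id),
         h + pvSumM ((l.map pvParse).filterMap id)) := by
  induction l with
  | nil => intro a d h; simp [pvSumD, pvSumM, pvDepthFrom]
  | cons e t ih =>
    intro a d h
    by_cases hf : pvHead e = "forward".toList
    · simp only [List.foldl_cons, List.map_cons, List.filterMap_cons, pvParse, hf, if_pos]
      rw [ih]
      simp [pvSumD, pvSumM, pvDepthFrom]; ring_nf; exact ⟨trivial, trivial⟩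
    · by_cases hu : pvHead e = "up".toList
      · simp only [List.foldl_cons, List.map_cons, List.filterMap_cons, pvParse, hu, if_pos]
        rw [ih]
        simp [pvSumD, pvSumM, pvDepthFrom]
        constructor
        · ring
        · rw [show a + -(pvLastInt? e).getD 0 = a - (pvLastInt? e).getD 0 by ring]
      · by_cases hd : pvHead e = "down".toList
        · simp only [List.foldl_cons, List.map_cons, List.filterMap_cons, pvParse, hd]
          rw [ih]
          simp [pvSumD, pvSumM, pvDepthFrom]
          ring
        · simp only [List.foldl_cons, List.map_cons, List.filterMap_cons, pvParse, hf, hu, hd,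
            ite_false]
          exact ih a d h

-- the aims the B loop produces: the running prefix sums appended to the seed list
def pvScan (a : Int) : List (Int × Int) → List Int
  | [] => []
  | (d, _) :: t => (a + d) :: pvScan (a + d) t

theorem pvAimsLoop_eq (cmds : List (Int × Int)) :
    ∀ (pre : List Int) (a : Int),
      pvAimsLoop cmds (pre ++ [a]) = (pre ++ [a]) ++ pvScan a cmds := by
  induction cmds with
  | nil => intro pre a; simp [pvAimsLoop, pvScan]
  | cons c t ih =>
    intro pre a
    obtain ⟨d, m⟩ := c
    show pvAimsLoop t ((pre ++ [a]) ++ [(PySem.List.pyGet? (pre ++ [a]) (-1)).getD 0 + d])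
        = (pre ++ [a]) ++ pvScan a ((d, m) :: t)
    rw [PySem.List.pyGet?_neg_one_append_singleton]
    have := ih (pre ++ [a]) (a + d)
    simp only [Option.getD_some, this, pvScan]
    simp

theorem pvZipFold_eq (cmds : List (Int × Int)) :
    ∀ (a acc : Int),
      (cmds.zip (a :: pvScan a cmds)).foldl (fun acc p => acc + p.2 * p.1.2) acc
        = acc + pvDepthFrom a cmds := by
  induction cmds with
  | nil => intro a acc; simp [pvDepthFrom]
  | cons c t ih =>
    intro a acc
    obtain ⟨d, m⟩ := c
    simp only [pvScan, List.zip_cons_cons, List.foldl_cons, pvDepthFrom]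
    rw [ih]
    ring

theorem pvSumM_foldl (cmds : List (Int × Int)) :
    ∀ acc : Int, cmds.foldl (fun acc p => acc + p.2) acc = acc + pvSumM cmds := by
  induction cmds with
  | nil => intro acc; simp [pvSumM]
  | cons c t ih => intro acc; simp only [List.foldl_cons]; rw [ih]; simp [pvSumM]; ring

-- ===== VERDICT (by name: the statement is the Claim_ definition above) =====
theorem calc_position_aimed_spec : Claim_equal_calc_position_aimed := by
  intro input_data _ _
  unfold Spec_calc_position_aimed
  simp only [calc_position_aimed, calc_position_aimed_alt]
  rw [pvAfold_eq, show ([0] : List Int) = [] ++ [0] from rfl, pvAimsLoop_eq]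
  simp only [List.nil_append, List.singleton_append]
  rw [pvZipFold_eq, pvSumM_foldl]
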